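-- pv_equiv track=rewrite | github.com/mauricioprb/otimizacao-computacional | resolver-equacoes/resolveEquacoes.py | separa_coef_var
-- ===== SOURCE A (Python) =====
-- def separa_coef_var(termo):
--     coef = ''
--     variavel = ''
--     indice = 0
--     for letra in termo:
--         if (letra.isdigit()):
--             coef = coef + letra
--             indice += 1  # Incrementa o índice
--         else:
--             if indice == 0:  # A primeira letra nao eh numero
--                 coef = '1'
--             variavel = termo[indice:]
--             break  # Sai do for
--     return coef, variavel
-- ===== SOURCE B (Python) =====
-- def separa_coef_var(termo):
--     idx = next((i for i, c in enumerate(termo) if not c.isdigit()), len(termo))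
--     coef = termo[:idx]
--     variavel = termo[idx:]
--     if idx == 0 and variavel:
--         coef = '1'
--     return coef, variavel
-- ===== Notes on version B (the rewrite author's own statement) =====
-- stated objective: simpler
-- what changed: Replaces the char-by-char coefficient accumulation with an index-find of the first non-digit followed by two slices and a single fixup for a leading non-digit.
import Mathlib
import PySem

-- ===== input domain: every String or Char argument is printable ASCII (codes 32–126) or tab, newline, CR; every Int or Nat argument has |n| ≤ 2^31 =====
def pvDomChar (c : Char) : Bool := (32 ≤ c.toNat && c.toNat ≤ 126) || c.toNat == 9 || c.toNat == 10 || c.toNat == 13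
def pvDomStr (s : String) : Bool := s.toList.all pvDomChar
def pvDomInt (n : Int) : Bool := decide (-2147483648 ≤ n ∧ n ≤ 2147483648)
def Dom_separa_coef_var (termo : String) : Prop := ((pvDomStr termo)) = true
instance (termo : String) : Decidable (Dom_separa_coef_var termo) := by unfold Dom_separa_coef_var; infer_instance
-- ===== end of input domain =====

-- B replaces A's char-by-char coefficient accumulation by an index-find of the
-- first non-digit plus two slices (objective: simpler decomposition).
-- Strings are ported through List Char (PySem.Chars); c.isdigit() = PySem.Chars.isdigit, exact on the ASCII domain.

-- ===== PORT A =====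
-- the for-loop with break: coef/indice are the loop state, `full` is the whole string for termo[indice:]
def pvGoA : List Char → List Char → Nat → List Char → List Char × List Char
  | [], coef, _, _ => (coef, [])
  | letra :: rest, coef, indice, full =>
    if PySem.Chars.isdigit letra then
      pvGoA rest (coef ++ [letra]) (indice + 1) full
    else
      ((if indice = 0 then ['1'] else coef), full.drop indice)  -- termo[indice:], 0 ≤ indice ≤ len

def separa_coef_var (termo : String) : String × String :=
  let r := pvGoA termo.toList [] 0 termo.toList
  (String.ofList r.1, String.ofList r.2)

-- ===== PORT B =====
-- idx = next((i for i,c in enumerate(termo) if not c.isdigit()), len(termo)): first non-digit index, else length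
def pvAltCore (l : List Char) : List Char × List Char :=
  let idx := l.findIdx (fun c => !PySem.Chars.isdigit c)
  let coef := l.take idx        -- termo[:idx]
  let variavel := l.drop idx    -- termo[idx:]
  if idx = 0 ∧ variavel ≠ [] then (['1'], variavel) else (coef, variavel)

def separa_coef_var_alt (termo : String) : String × String :=
  let r := pvAltCore termo.toList
  (String.ofList r.1, String.ofList r.2)

-- ===== PRECONDITION & SPEC =====
def Spec_separa_coef_var (termo : String) (out : String × String) : Prop := out = separa_coef_var_alt termo
instance (termo : String) (out : String × String) : Decidable (Spec_separa_coef_var termo out) := by unfold Spec_separa_coef_var; infer_instance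

-- ===== CLAIM (what is proved, stated in full; the proofs are below) =====
def Claim_equal_separa_coef_var : Prop := ∀ (termo : String), Dom_separa_coef_var termo → Spec_separa_coef_var termo (separa_coef_var termo)

-- ===== LEMMAS AND PROOFS =====

-- the first non-digit of pre ++ l is found inside l when pre is all digits
lemma pv_findIdx_append (pre l : List Char) (h : ∀ c ∈ pre, PySem.Chars.isdigit c) :
    (pre ++ l).findIdx (fun c => !PySem.Chars.isdigit c)
      = pre.length + l.findIdx (fun c => !PySem.Chars.isdigit c) := by
  induction pre with
  | nil => simp
  | cons c pre ih =>
    have hc : PySem.Chars.isdigit c := h c (by simp)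
    simp [List.findIdx_cons, hc, ih (fun x hx => h x (by simp [hx])), Nat.add_assoc, Nat.add_comm 1]

-- loop invariant: after consuming the all-digit prefix `pre`, A's loop agrees with B's core on pre ++ l
lemma pv_main (l pre : List Char) (h : ∀ c ∈ pre, PySem.Chars.isdigit c) :
    pvGoA l pre pre.length (pre ++ l) = pvAltCore (pre ++ l) := by
  induction l generalizing pre with
  | nil =>
    have hidx : pre.findIdx (fun c => !PySem.Chars.isdigit c) = pre.length := by
      simpa using pv_findIdx_append pre [] h
    simp [pvGoA, pvAltCore, hidx, List.drop_length, List.take_length]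
  | cons c rest ih =>
    by_cases hc : PySem.Chars.isdigit c
    · have h' : ∀ x ∈ pre ++ [c], PySem.Chars.isdigit x := by
        intro x hx
        rcases List.mem_append.mp hx with hx | hx
        · exact h x hx
        · simp at hx; subst hx; exact hc
      have := ih (pre ++ [c]) h'
      simpa [pvGoA, hc, List.append_assoc] using this
    · have hidx : (pre ++ c :: rest).findIdx (fun c => !PySem.Chars.isdigit c) = pre.length := by
        have := pv_findIdx_append pre (c :: rest) h
        simp [List.findIdx_cons, hc] at this
        simpa using this
      have hdrop : (pre ++ c :: rest).drop pre.length = c :: rest := by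
        simp
      have htake : (pre ++ c :: rest).take pre.length = pre := by
        simp
      by_cases h0 : pre.length = 0
      · simp [pvGoA, hc, pvAltCore, hidx, h0]
      · simp [pvGoA, hc, pvAltCore, hidx, hdrop, htake, h0]

-- ===== VERDICT (by name: the statement is the Claim_ definition above) =====
theorem separa_coef_var_spec : Claim_equal_separa_coef_var := by
  intro termo _
  show _ = _
  unfold separa_coef_var separa_coef_var_alt
  have := pv_main termo.toList [] (by simp)
  simpa using congrArg (fun r => (String.ofList r.1, String.ofList r.2)) this
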